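-- pv_equiv track=rewrite | github.com/HydrologicEngineeringCenter/cwms-database | schema/src/mathComputations.py | prefix_to_lisp
-- ===== SOURCE A (Python) =====
-- ops = {
-- 	#-----------------------------------------------#
-- 	# symbol operators (can be infix if arity == 2) #
-- 	#-----------------------------------------------#
-- 	"+"     : {"precedence" : -3, "arity" :  2, "python": "args[0] + args[1]"          },
-- 	"-"     : {"precedence" : -3, "arity" :  2, "python": "args[0] - args[1]"          },
-- 	"*"     : {"precedence" : -2, "arity" :  2, "python": "args[0] * args[1]"          },
-- 	"/"     : {"precedence" : -2, "arity" :  2, "python": "args[0] / args[1]"          },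
-- 	"//"    : {"precedence" : -2, "arity" :  2, "python": "args[0] // args[1]"         },
-- 	"%"     : {"precedence" : -2, "arity" :  2, "python": "args[0] % args[1]"          },
-- 	"**"    : {"precedence" : -1, "arity" :  2, "python": "args[0] ** args[1]"         },
-- 	#--------------------------------#
-- 	# fixed-arity function operators #
-- 	#--------------------------------#
-- 	"abs"   : {"precedence" :  0, "arity" :  1, "python": "abs(args[0])"               },
-- 	"neg"   : {"precedence" :  0, "arity" :  1, "python": "-args[0]"                   },
-- 	"inv"   : {"precedence" :  0, "arity" :  1, "python": "1/args[0]"                  },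
-- 	"mod"   : {"precedence" :  0, "arity" :  2, "python": "math.fmod(args[0], args[1])"},
-- 	"pow"   : {"precedence" :  0, "arity" :  2, "python": "math.pow(args[0], args[1])" },
-- 	"sqrt"  : {"precedence" :  0, "arity" :  1, "python": "math.sqrt(args[0])"         },
-- 	"exp"   : {"precedence" :  0, "arity" :  1, "python": "math.exp(args[0])"          },
-- 	"log"   : {"precedence" :  0, "arity" :  1, "python": "math.log(args[0])"          },
-- 	"log10" : {"precedence" :  0, "arity" :  1, "python": "math.log10(args[0])"        },
-- 	"sin"   : {"precedence" :  0, "arity" :  1, "python": "math.sin(args[0])"          },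
-- 	"cos"   : {"precedence" :  0, "arity" :  1, "python": "math.cos(args[0])"          },
-- 	"tan"   : {"precedence" :  0, "arity" :  1, "python": "math.tan(args[0])"          },
-- 	"asin"  : {"precedence" :  0, "arity" :  1, "python": "math.asin(args[0])"         },
-- 	"acos"  : {"precedence" :  0, "arity" :  1, "python": "math.acos(args[0])"         },
-- 	"atan"  : {"precedence" :  0, "arity" :  1, "python": "math.atan(args[0])"         },
-- 	#----------------------------------------#
-- 	# 0-arity function operators (CONSTANTS) #
-- 	#----------------------------------------#
-- 	"e"     : {"precedence" :  0, "arity" :  0, "python": "math.e"                     },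
-- 	"pi"    : {"precedence" :  0, "arity" :  0, "python": "math.pi"                    },
-- 	#-----------------------------#
-- 	# variadic function operators #
-- 	#-----------------------------#
-- 	"min"   : {"precedence" :  0, "arity" : -1, "python": "min(args)"                  },
-- 	"max"   : {"precedence" :  0, "arity" : -1, "python": "max(args)"                  },
-- }
--
-- op_tokens = ops.keys()
--
-- def prefix_to_lisp(args) :
-- 	if type(args) == type([]) :
-- 		tokens = args
-- 	elif type(args) == type("") :
-- 		tokens = args.split()
--
-- 	output_tokens = tokens[:]
-- 	output_tokens.reverse()
--
-- 	def parse_prefix_expr(tokens) :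
-- 		stack = []
-- 		op = tokens.pop()
-- 		assert op in op_tokens
-- 		arity = ops[op]["arity"]
-- 		if arity < 0 : arity = int(tokens.pop())
-- 		for i in range(arity) :
-- 			if tokens[-1] in op_tokens :
-- 				stack.append(parse_prefix_expr(tokens))
-- 			else :
-- 				stack.append(tokens.pop())
-- 		if arity == 0 :
-- 			return op
-- 		else :
-- 			return "(%s %s)" % (op, " ".join(map(str, stack)))
--
-- 	output_tokens = parse_prefix_expr(output_tokens).split()
--
-- 	if type(args) == type("") :
-- 		return " ".join(output_tokens)
-- 	else :
-- 		return output_tokens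
-- ===== SOURCE B (Python) =====
-- # B: iterative explicit-stack parser (frames of [op, remaining, collected]) instead of
-- # recursive descent over a shared mutable token list; return-value equivalence only.
-- ops = {
-- 	"+"     : {"precedence" : -3, "arity" :  2, "python": "args[0] + args[1]"          },
-- 	"-"     : {"precedence" : -3, "arity" :  2, "python": "args[0] - args[1]"          },
-- 	"*"     : {"precedence" : -2, "arity" :  2, "python": "args[0] * args[1]"          },
-- 	"/"     : {"precedence" : -2, "arity" :  2, "python": "args[0] / args[1]"          },
-- 	"//"    : {"precedence" : -2, "arity" :  2, "python": "args[0] // args[1]"         },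
-- 	"%"     : {"precedence" : -2, "arity" :  2, "python": "args[0] % args[1]"          },
-- 	"**"    : {"precedence" : -1, "arity" :  2, "python": "args[0] ** args[1]"         },
-- 	"abs"   : {"precedence" :  0, "arity" :  1, "python": "abs(args[0])"               },
-- 	"neg"   : {"precedence" :  0, "arity" :  1, "python": "-args[0]"                   },
-- 	"inv"   : {"precedence" :  0, "arity" :  1, "python": "1/args[0]"                  },
-- 	"mod"   : {"precedence" :  0, "arity" :  2, "python": "math.fmod(args[0], args[1])"},
-- 	"pow"   : {"precedence" :  0, "arity" :  2, "python": "math.pow(args[0], args[1])" },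
-- 	"sqrt"  : {"precedence" :  0, "arity" :  1, "python": "math.sqrt(args[0])"         },
-- 	"exp"   : {"precedence" :  0, "arity" :  1, "python": "math.exp(args[0])"          },
-- 	"log"   : {"precedence" :  0, "arity" :  1, "python": "math.log(args[0])"          },
-- 	"log10" : {"precedence" :  0, "arity" :  1, "python": "math.log10(args[0])"        },
-- 	"sin"   : {"precedence" :  0, "arity" :  1, "python": "math.sin(args[0])"          },
-- 	"cos"   : {"precedence" :  0, "arity" :  1, "python": "math.cos(args[0])"          },
-- 	"tan"   : {"precedence" :  0, "arity" :  1, "python": "math.tan(args[0])"          },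
-- 	"asin"  : {"precedence" :  0, "arity" :  1, "python": "math.asin(args[0])"         },
-- 	"acos"  : {"precedence" :  0, "arity" :  1, "python": "math.acos(args[0])"         },
-- 	"atan"  : {"precedence" :  0, "arity" :  1, "python": "math.atan(args[0])"         },
-- 	"e"     : {"precedence" :  0, "arity" :  0, "python": "math.e"                     },
-- 	"pi"    : {"precedence" :  0, "arity" :  0, "python": "math.pi"                    },
-- 	"min"   : {"precedence" :  0, "arity" : -1, "python": "min(args)"                  },
-- 	"max"   : {"precedence" :  0, "arity" : -1, "python": "max(args)"                  },
-- }
--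
-- op_tokens = ops.keys()
--
-- def prefix_to_lisp(args):
-- 	if type(args) == type([]):
-- 		tokens = args[:]
-- 	elif type(args) == type(""):
-- 		tokens = args.split()
-- 	tokens.reverse()
--
-- 	stack = []            # frames [op, remaining_args, collected]
-- 	result = None
-- 	while result is None:
-- 		t = tokens.pop()
-- 		if t in op_tokens:
-- 			arity = ops[t]["arity"]
-- 			if arity < 0:
-- 				arity = int(tokens.pop())
-- 			if arity == 0:
-- 				val = t                   # constants stay bare
-- 			else:
-- 				stack.append([t, arity, []])
-- 				continue
-- 		else:
-- 			if not stack: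
-- 				raise ValueError("expression must start with an operator")
-- 			val = t
-- 		while True:                       # fold completed frames upward
-- 			if not stack:
-- 				result = val              # root complete; trailing tokens ignored
-- 				break
-- 			top = stack[-1]
-- 			top[2].append(val)
-- 			top[1] -= 1
-- 			if top[1] > 0:
-- 				break
-- 			stack.pop()
-- 			val = "(%s %s)" % (top[0], " ".join(top[2]))
--
-- 	output_tokens = result.split()
-- 	if type(args) == type(""):
-- 		return " ".join(output_tokens)
-- 	return output_tokens
-- ===== Notes on version B (the rewrite author's own statement) =====
-- stated objective: alternative
-- what changed: A's recursive-descent parse_prefix_expr (nested recursion popping a shared mutable token list) is replaced by a single iterative loop driving an explicit stack of [op, remaining_arity, collected_args] frames that are folded upward when complete; Pre_ excludes token lists where a variadic operator carries a negative explicit count, a malformed count on which no behaviour is specified (A collects zero arguments, B's fold takes one).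
-- outside the precondition, e.g. on prefix_to_lisp(['min', '-1', '2']): A returns ['(min', ')'], B returns ['(min', '2)']; on prefix_to_lisp(['min', '-1']): A returns ['(min', ')'], B raises IndexError
import Mathlib
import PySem

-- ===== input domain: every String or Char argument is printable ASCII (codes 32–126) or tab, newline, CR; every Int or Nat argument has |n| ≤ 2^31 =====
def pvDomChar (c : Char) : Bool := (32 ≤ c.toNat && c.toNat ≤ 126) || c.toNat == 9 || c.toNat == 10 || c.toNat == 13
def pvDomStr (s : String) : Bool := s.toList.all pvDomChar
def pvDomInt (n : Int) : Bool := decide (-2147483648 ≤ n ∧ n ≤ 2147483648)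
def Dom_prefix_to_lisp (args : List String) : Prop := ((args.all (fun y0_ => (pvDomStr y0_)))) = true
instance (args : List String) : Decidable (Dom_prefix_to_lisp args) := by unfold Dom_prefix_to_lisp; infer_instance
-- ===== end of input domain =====

-- B re-implements A's recursive-descent prefix parser as an explicit-stack loop (same output);
-- objective: alternative decomposition, not speed. Equivalence is about the return value
-- (neither program mutates its argument).

-- ===== PORT A =====
-- shared module-level table: the operator names and their arities (only these two fields matter here)
def opNames : List String :=
  ["+", "-", "*", "/", "//", "%", "**", "abs", "neg", "inv", "mod", "pow", "sqrt", "exp",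
   "log", "log10", "sin", "cos", "tan", "asin", "acos", "atan", "e", "pi", "min", "max"]

def arityOf (t : String) : Int :=
  if t = "+" ∨ t = "-" ∨ t = "*" ∨ t = "/" ∨ t = "//" ∨ t = "%" ∨ t = "**" ∨ t = "mod" ∨ t = "pow" then 2
  else if t = "e" ∨ t = "pi" then 0
  else if t = "min" ∨ t = "max" then -1
  else 1

-- " ".join(map(str, stack)) — all elements are already strings
def joinSpace (parts : List String) : String := PySem.Str.join " " parts

-- parse_prefix_expr: A reverses a copy of the token list and pops from the END; that is exactly
-- consumption from the FRONT of the original list, ported that way. The fuel argument only makes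
-- the nested recursion structurally terminating (args.length + 1 is always enough, proved below);
-- `none` marks exactly the inputs where the Python raises (pop from empty list, failed assert,
-- int() ValueError).
mutual
def parseA : Nat → List String → Option (String × List String)
  | 0, _ => none
  | Nat.succ _, [] => none
  | Nat.succ f, op :: rest =>
    if op ∈ opNames then
      let a := arityOf op
      if a < 0 then
        match rest with
        | [] => none
        | c :: r2 =>
          match PySem.Int.ofStr? c with
          | none => none
          | some n => finishA f op n r2
      else finishA f op a rest
    else none
termination_by f _ => (f, 0, 0)

-- the `for i in range(arity)` loop plus the final return of parse_prefix_expr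
def finishA : Nat → String → Int → List String → Option (String × List String)
  | f, op, n, toks =>
    match loopA f n.toNat toks [] with
    | none => none
    | some (st, rest) =>
      if n == 0 then some (op, rest)
      else some ("(" ++ op ++ " " ++ joinSpace st ++ ")", rest)
termination_by f _ _ _ => (f, 1, 0)

def loopA : Nat → Nat → List String → List String → Option (List String × List String)
  | _, 0, toks, acc => some (acc, toks)
  | _, Nat.succ _, [], _ => none
  | f, Nat.succ m, t :: rest, acc =>
    if t ∈ opNames then
      match parseA f (t :: rest) with
      | none => none
      | some (e, rest') => loopA f m rest' (acc ++ [e])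
    else loopA f m rest (acc ++ [t])
termination_by f m _ _ => (f, 0, m + 1)
end

def prefix_to_lisp (args : List String) : List String :=
  match parseA (args.length + 1) args with
  | none => []                                   -- Python raises here; excluded by Pre_
  | some (e, _) => PySem.Str.split₀ e            -- .split()

-- ===== PORT B =====
-- explicit stack of frames (op, remaining_arity, collected_args)
mutual
-- attach a completed expression: fold completed frames upward, or signal the root result (.inl)
def attachB : String → List (String × Int × List String) →
    Sum String (List (String × Int × List String))
  | v, [] => .inl v
  | v, (op, rem, acc) :: k =>
    let acc' := acc ++ [v]
    if rem - 1 ≤ 0 then attachB ("(" ++ op ++ " " ++ joinSpace acc' ++ ")") k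
    else .inr ((op, rem - 1, acc') :: k)
end

mutual
def runB : List String → List (String × Int × List String) → Option String
  | [], _ => none
  | t :: rest, k =>
    if t ∈ opNames then
      let a := arityOf t
      if a < 0 then
        match rest with
        | [] => none
        | c :: r2 =>
          match PySem.Int.ofStr? c with
          | none => none
          | some n => stepB t n r2 k
      else stepB t a rest k
    else
      match k with
      | [] => none                               -- bare literal at top level: Source B raises
      | _ => contB t rest k
termination_by toks _ => (toks.length, 0)

def stepB : String → Int → List String → List (String × Int × List String) → Option String
  | op, n, toks, k =>
    if n == 0 then contB op toks k               -- constants stay bare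
    else runB toks ((op, n, []) :: k)
termination_by _ _ toks _ => (toks.length, 2)

def contB : String → List String → List (String × Int × List String) → Option String
  | v, toks, k =>
    match attachB v k with
    | .inl r => some r                           -- root complete; trailing tokens ignored
    | .inr k' => runB toks k'
termination_by _ toks _ => (toks.length, 1)
end

def prefix_to_lisp_alt (args : List String) : List String :=
  match runB args [] with
  | none => []
  | some e => PySem.Str.split₀ e

-- ===== PRECONDITION & SPEC =====
-- Grammar (shape) condition: the token list starts with a complete prefix expression whose
-- variadic count tokens are nonnegative integers. `chk toks need` is the standard
-- arity-weighted count for prefix grammars — a single linear scan keeping only the number of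
-- still-needed expressions (an operator of arity a turns one needed expression into a, any
-- other token satisfies one). It builds no strings and keeps no stack: it is the grammar of
-- the input, not either port's algorithm (neither port computes such a count).
def chk : List String → Nat → Bool
  | _, 0 => true
  | [], _ + 1 => false
  | t :: rest, m + 1 =>
    if t ∈ opNames then
      let a := arityOf t
      if a < 0 then
        match rest with
        | [] => false
        | c :: r2 =>
          match PySem.Int.ofStr? c with
          | none => false
          | some n => if n < 0 then false else chk r2 (m + n.toNat)
      else chk rest (m + a.toNat)
    else chk rest m

-- Pre_ excludes (besides the inputs where A raises) token lists in which a variadic operator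
-- (min/max) carries a NEGATIVE explicit count: the count is malformed and no behaviour is
-- specified there — A collects zero arguments and returns the lopsided "(min )", B's frame
-- fold takes one argument or runs out of tokens; neither value is the function's meaning.
-- So Pre_ = the first token is an operator (A's assert) and the tokens start with one complete
-- prefix expression with nonnegative variadic counts (A ignores anything after it).
def Pre_prefix_to_lisp (args : List String) : Prop :=
  args.headD "" ∈ opNames ∧ chk args 1 = true
instance (args : List String) : Decidable (Pre_prefix_to_lisp args) := by
  unfold Pre_prefix_to_lisp; infer_instance

def pvWitness_prefix_to_lisp : List String := ["+", "1", "2"]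

def Spec_prefix_to_lisp (args : List String) (out : List String) : Prop := out = prefix_to_lisp_alt args
instance (args : List String) (out : List String) : Decidable (Spec_prefix_to_lisp args out) := by unfold Spec_prefix_to_lisp; infer_instance

-- ===== CLAIM (what is proved, stated in full; the proofs are below) =====
def Claim_equal_prefix_to_lisp : Prop := ∀ (args : List String), Dom_prefix_to_lisp args → Pre_prefix_to_lisp args → Spec_prefix_to_lisp args (prefix_to_lisp args)

-- ===== LEMMAS AND PROOFS =====

-- Combined adequacy + simulation invariant for the argument-collecting loop: if `chk`
-- grants m+1 expressions followed by a j-granting tail, then A's loop over m+1 iterations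
-- succeeds, and B, started on the same tokens with an open frame needing m+1 more arguments,
-- reaches exactly the fold of that frame.
def Good (f : Nat) : Prop :=
  ∀ m toks acc j, toks.length + 1 ≤ f → chk toks (m + 1 + j) = true →
    ∃ st rest, loopA f (m + 1) toks acc = some (st, rest) ∧ rest.length ≤ toks.length ∧
      chk rest j = true ∧
      ∀ op k, runB toks ((op, (m : Int) + 1, acc) :: k) =
        contB ("(" ++ op ++ " " ++ joinSpace st ++ ")") rest k

-- one expression consumed: A (parse or literal pop) and B (with any nonempty stack, or an
-- operator head) advance from toks to rest1 producing the same rendered expression e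
theorem one_step (f : Nat) (ihf : Good f) (toks : List String) (j : Nat)
    (hf : toks.length + 1 ≤ f + 1) (hchk : chk toks (1 + j) = true) :
    ∃ e rest1, rest1.length < toks.length ∧ chk rest1 j = true ∧
      (toks.headD "" ∈ opNames → parseA (f + 1) toks = some (e, rest1)) ∧
      (∀ m acc, loopA (f + 1) (m + 1) toks acc = loopA (f + 1) m rest1 (acc ++ [e])) ∧
      (∀ k, (toks.headD "" ∈ opNames ∨ k ≠ []) → runB toks k = contB e rest1 k) := by
  match toks with
  | [] =>
    rw [show 1 + j = j + 1 from Nat.add_comm 1 j] at hchk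
    simp [chk] at hchk
  | t :: r =>
    rw [show 1 + j = j + 1 from Nat.add_comm 1 j] at hchk
    by_cases ht : t ∈ opNames
    · by_cases ha : arityOf t < 0
      · -- variadic operator: the next token is the (nonnegative) argument count
        rw [chk.eq_def] at hchk
        simp only [ht, ha, if_pos] at hchk
        match r with
        | [] => simp at hchk
        | c :: r2 =>
          dsimp only at hchk
          match hc : PySem.Int.ofStr? c with
          | none => rw [hc] at hchk; simp at hchk
          | some nn =>
            rw [hc] at hchk; dsimp only at hchk
            have hnn : ¬ nn < 0 := by by_contra h; simp [h] at hchk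
            rw [if_neg hnn] at hchk
            rcases Nat.eq_zero_or_pos nn.toNat with h0 | hpos
            · -- explicit count 0: bare operator name
              have hz : nn = 0 := by omega
              refine ⟨t, r2, by simp, ?_, ?_, ?_, ?_⟩
              · rw [h0, Nat.add_zero] at hchk; exact hchk
              · intro _
                rw [parseA.eq_def]
                simp [ht, ha, hc, finishA, hz, loopA]
              · intro m acc
                rw [loopA.eq_def]
                have hp : parseA (f + 1) (t :: c :: r2) = some (t, r2) := by
                  rw [parseA.eq_def]; simp [ht, ha, hc, finishA, hz, loopA]
                simp [ht, hp]
              · intro k _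
                rw [runB.eq_def]
                simp [ht, ha, hc, stepB, hz]
            · -- explicit count ≥ 1: collect that many arguments
              obtain ⟨p, hp⟩ : ∃ p, nn.toNat = p + 1 := ⟨nn.toNat - 1, by omega⟩
              obtain ⟨st1, rest1, hl1, hlen1, hc1, hB1⟩ :=
                ihf p r2 [] j (by simp at hf ⊢; omega)
                  (by rw [show p + 1 + j = j + nn.toNat by omega]; exact hchk)
              have hnz : ¬ (nn == 0) = true := by simp; omega
              have hA : parseA (f + 1) (t :: c :: r2) =
                  some ("(" ++ t ++ " " ++ joinSpace st1 ++ ")", rest1) := by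
                rw [parseA.eq_def]
                simp only [ht, ha, if_pos, hc, finishA, hp, hl1, hnz,
                  Bool.false_eq_true, if_false]
              refine ⟨"(" ++ t ++ " " ++ joinSpace st1 ++ ")", rest1,
                by simp at hlen1 ⊢; omega, hc1, fun _ => hA, ?_, ?_⟩
              · intro m acc
                rw [loopA.eq_def]; simp [ht, hA]
              · intro k _
                have hcast : ((p : Nat) : Int) + 1 = nn := by omega
                rw [runB.eq_def]
                simp only [ht, ha, if_pos, hc, stepB, hnz, Bool.false_eq_true, if_false]
                rw [← hcast]
                exact hB1 t k
      · -- fixed-arity operator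
        have haz : (0 : Int) ≤ arityOf t := by omega
        rw [chk.eq_def] at hchk
        simp only [ht, ha, if_pos, if_false] at hchk
        rcases Nat.eq_zero_or_pos (arityOf t).toNat with h0 | hpos
        · -- arity 0 (constants e / pi): bare operator name
          have hz : arityOf t = 0 := by omega
          refine ⟨t, r, by simp, ?_, ?_, ?_, ?_⟩
          · rw [h0, Nat.add_zero] at hchk; exact hchk
          · intro _
            rw [parseA.eq_def]; simp [ht, finishA, hz, loopA]
          · intro m acc
            have hp : parseA (f + 1) (t :: r) = some (t, r) := by
              rw [parseA.eq_def]; simp [ht, finishA, hz, loopA]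
            rw [loopA.eq_def]; simp [ht, hp]
          · intro k _
            rw [runB.eq_def]; simp [ht, stepB, hz]
        · -- arity 1 or 2: collect the arguments
          obtain ⟨p, hp⟩ : ∃ p, (arityOf t).toNat = p + 1 := ⟨(arityOf t).toNat - 1, by omega⟩
          obtain ⟨st1, rest1, hl1, hlen1, hc1, hB1⟩ :=
            ihf p r [] j (by simp at hf ⊢; omega)
              (by rw [show p + 1 + j = j + (arityOf t).toNat by omega]; exact hchk)
          have hnz : ¬ (arityOf t == 0) = true := by simp; omega
          have hA : parseA (f + 1) (t :: r) =
              some ("(" ++ t ++ " " ++ joinSpace st1 ++ ")", rest1) := by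
            rw [parseA.eq_def]
            simp only [ht, ha, if_pos, if_false, finishA, hp, hl1, hnz,
              Bool.false_eq_true]
          refine ⟨"(" ++ t ++ " " ++ joinSpace st1 ++ ")", rest1,
            by simp at hlen1 ⊢; omega, hc1, fun _ => hA, ?_, ?_⟩
          · intro m acc
            rw [loopA.eq_def]; simp [ht, hA]
          · intro k _
            have hcast : ((p : Nat) : Int) + 1 = arityOf t := by omega
            rw [runB.eq_def]
            simp only [ht, ha, if_pos, if_false, stepB, hnz, Bool.false_eq_true]
            rw [← hcast]
            exact hB1 t k
    · -- plain token: consumed directly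
      rw [chk.eq_def] at hchk
      simp only [ht, if_false] at hchk
      refine ⟨t, r, by simp, hchk, ?_, ?_, ?_⟩
      · intro h; exact absurd (by simpa using h) ht
      · intro m acc; rw [loopA.eq_def]; simp [ht]
      · intro k hk
        rcases hk with hk | hk
        · exact absurd (by simpa using hk) ht
        · match k with
          | [] => exact absurd rfl hk
          | fr :: k' => rw [runB.eq_def]; simp [ht]

theorem good_all : ∀ f, Good f := by
  intro f
  induction f with
  | zero => intro m toks acc j hf; exact absurd hf (by omega)
  | succ f ihf =>
    intro m
    induction m with
    | zero =>
      intro toks acc j hf hchk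
      obtain ⟨e, rest1, hlen, hcj, _, hL, hB⟩ := one_step f ihf toks j hf (by simpa using hchk)
      refine ⟨acc ++ [e], rest1, ?_, by omega, hcj, ?_⟩
      · rw [hL 0 acc, loopA]
      · intro op k
        rw [hB ((op, ((0 : Nat) : Int) + 1, acc) :: k) (Or.inr (by simp))]
        simp [contB, attachB]
    | succ m ihm =>
      intro toks acc j hf hchk
      have hchk' : chk toks (1 + (m + 1 + j)) = true := by
        have : 1 + (m + 1 + j) = m + 1 + 1 + j := by omega
        rw [this]; exact hchk
      obtain ⟨e, rest1, hlen, hcj, _, hL, hB⟩ := one_step f ihf toks (m + 1 + j) hf hchk'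
      obtain ⟨st, rest, hl2, hlen2, hc2, hB2⟩ := ihm rest1 (acc ++ [e]) j (by omega) hcj
      refine ⟨st, rest, ?_, by omega, hc2, ?_⟩
      · rw [show m + 1 + 1 = (m + 1) + 1 from rfl, hL (m + 1) acc]; exact hl2
      · intro op k
        rw [hB ((op, ((m + 1 : Nat) : Int) + 1, acc) :: k) (Or.inr (by simp))]
        have hrem : ((m + 1 : Nat) : Int) + 1 - 1 = (m : Int) + 1 := by push_cast; ring
        rw [contB.eq_def]
        simp only [attachB, hrem]
        exact hB2 op k

-- ===== VERDICT (by name: the statement is the Claim_ definition above) =====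
theorem prefix_to_lisp_spec : Claim_equal_prefix_to_lisp := by
  intro args _ hpre
  unfold Spec_prefix_to_lisp
  obtain ⟨h1, h2⟩ := hpre
  obtain ⟨e, rest1, _, _, hP, _, hB⟩ :=
    one_step args.length (good_all args.length) args 0 (by omega) (by simpa using h2)
  have hA := hP h1
  have hBr := hB [] (Or.inl h1)
  unfold prefix_to_lisp prefix_to_lisp_alt
  rw [hA, hBr]
  simp [contB, attachB]
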